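-- pv_equiv track=rewrite | github.com/DumbledoreD/algo-spec | assignments/c4w4/suffix_array_long.py | compute_class
-- ===== SOURCE A (Python) =====
-- def compute_class(text, order_to_start_index):
--     start_index_to_eq_class = [0] * len(text)
--     start_index_to_eq_class[order_to_start_index[0]] = 0
--
--     # Iterate through order
--     for order in range(1, len(order_to_start_index)):
--         cur_start_index = order_to_start_index[order]
--         prev_start_index = order_to_start_index[order - 1]
--
--         if text[cur_start_index] == text[prev_start_index]:
--             start_index_to_eq_class[cur_start_index] = start_index_to_eq_class[
--                 prev_start_index
--             ]
--         else:
--             start_index_to_eq_class[cur_start_index] = (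
--                 start_index_to_eq_class[prev_start_index] + 1
--             )
--
--     return start_index_to_eq_class
-- ===== SOURCE B (Python) =====
-- def compute_class(text, order_to_start_index):
--     n = len(order_to_start_index)
--     # 1 exactly where the character changes between consecutive positions of the order
--     flags = [0] + [
--         1 if text[order_to_start_index[k]] != text[order_to_start_index[k - 1]] else 0
--         for k in range(1, n)
--     ]
--     # prefix sums of the flags: equivalence class of the k-th position in sorted order
--     classes = []
--     acc = 0
--     for f in flags:
--         acc += f
--         classes.append(acc)
--     # scatter the classes into the start-index array
--     out = [0] * len(text)
--     for idx, c in zip(order_to_start_index, classes):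
--         out[idx] = c
--     return out
-- ===== Notes on version B (the rewrite author's own statement) =====
-- stated objective: alternative
-- what changed: B computes a difference-flag list over consecutive order positions, turns it into classes by a prefix-sum pass, and scatters the classes into the output array, instead of A's single loop that reads each class back from the partially written output array.
import Mathlib
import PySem

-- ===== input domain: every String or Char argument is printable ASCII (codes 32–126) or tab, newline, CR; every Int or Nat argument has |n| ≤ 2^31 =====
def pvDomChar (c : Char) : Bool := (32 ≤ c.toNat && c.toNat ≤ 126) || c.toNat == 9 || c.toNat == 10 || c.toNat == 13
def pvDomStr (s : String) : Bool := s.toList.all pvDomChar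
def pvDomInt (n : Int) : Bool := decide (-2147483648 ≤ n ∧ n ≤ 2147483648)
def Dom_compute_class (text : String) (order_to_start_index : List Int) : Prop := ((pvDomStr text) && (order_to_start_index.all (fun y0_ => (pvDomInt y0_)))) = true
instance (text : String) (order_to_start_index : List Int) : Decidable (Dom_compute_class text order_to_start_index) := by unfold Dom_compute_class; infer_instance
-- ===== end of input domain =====

-- B replaces A's read-back from the partially written output array by a flag list, a prefix-sum pass
-- and a scatter pass (objective: alternative decomposition, same cost).


-- ===== PORT A =====
def compute_class (text : String) (order_to_start_index : List Int) : List Int :=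
  let chars := text.toList
  -- start_index_to_eq_class = [0] * len(text); start_index_to_eq_class[order_to_start_index[0]] = 0
  -- (IndexError on empty order / out-of-range index is excluded by Pre_)
  let s1 := PySem.List.pySetD (List.replicate chars.length (0 : Int))
              (PySem.List.pyGetD order_to_start_index 0 0) 0
  (PySem.List.pyRange 1 (PySem.List.len order_to_start_index) 1).foldl
    (fun s order =>
      let cur := PySem.List.pyGetD order_to_start_index order 0
      let prev := PySem.List.pyGetD order_to_start_index (order - 1) 0
      if PySem.List.pyGetD chars cur 'A' == PySem.List.pyGetD chars prev 'A' then
        PySem.List.pySetD s cur (PySem.List.pyGetD s prev 0)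
      else
        PySem.List.pySetD s cur (PySem.List.pyGetD s prev 0 + 1)) s1

-- ===== PORT B =====
def compute_class_alt (text : String) (order_to_start_index : List Int) : List Int :=
  let chars := text.toList
  let n := PySem.List.len order_to_start_index
  -- flags = [0] + [1 if text[o[k]] != text[o[k-1]] else 0 for k in range(1, n)]
  let flags : List Int := 0 :: (PySem.List.pyRange 1 n 1).map (fun k =>
    if PySem.List.pyGetD chars (PySem.List.pyGetD order_to_start_index k 0) 'A'
         ≠ PySem.List.pyGetD chars (PySem.List.pyGetD order_to_start_index (k - 1) 0) 'A'
    then (1 : Int) else 0)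
  -- classes = running prefix sums of flags (accumulator loop with append, here: cons + reverse)
  let classes := (flags.foldl (fun (p : List Int × Int) f => ((p.2 + f) :: p.1, p.2 + f)) ([], 0)).1.reverse
  -- out = [0] * len(text); for idx, c in zip(order, classes): out[idx] = c
  (order_to_start_index.zip classes).foldl
    (fun out ic => PySem.List.pySetD out ic.1 ic.2)
    (List.replicate chars.length (0 : Int))

-- ===== PRECONDITION & SPEC =====
-- Pre_ is exactly where the Python A returns: a nonempty order whose every entry is a valid
-- (possibly negative) Python index into text; otherwise A raises IndexError.
def Pre_compute_class (text : String) (order_to_start_index : List Int) : Prop :=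
  order_to_start_index ≠ [] ∧
  ∀ i ∈ order_to_start_index, PySem.Raise.InRange text.toList.length i
instance (text : String) (order_to_start_index : List Int) : Decidable (Pre_compute_class text order_to_start_index) := by unfold Pre_compute_class; infer_instance
def pvWitness_compute_class : String × List Int := ("ab", [1, 0])

def Spec_compute_class (text : String) (order_to_start_index : List Int) (out : List Int) : Prop := out = compute_class_alt text order_to_start_index
instance (text : String) (order_to_start_index : List Int) (out : List Int) : Decidable (Spec_compute_class text order_to_start_index out) := by unfold Spec_compute_class; infer_instance

-- ===== CLAIM (what is proved, stated in full; the proofs are below) =====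
def Claim_equal_compute_class : Prop := ∀ (text : String) (order_to_start_index : List Int), Dom_compute_class text order_to_start_index → Pre_compute_class text order_to_start_index → Spec_compute_class text order_to_start_index (compute_class text order_to_start_index)

-- ===== LEMMAS AND PROOFS =====

-- normalized (Python) index
def nrmIdx (n : Nat) (i : Int) : Nat := if 0 ≤ i then i.toNat else n - (-i).toNat

lemma pyIdx?_inRange (n : Nat) (i : Int) (h : PySem.Raise.InRange n i) :
    PySem.List.pyIdx? n i = some (nrmIdx n i) ∧ nrmIdx n i < n := by
  obtain ⟨h1, h2⟩ := h
  unfold PySem.List.pyIdx? nrmIdx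
  by_cases h0 : 0 ≤ i
  · rw [if_pos h0, if_pos h2, if_pos h0]
    exact ⟨rfl, by omega⟩
  · rw [if_neg h0, if_pos h1, if_neg h0]
    exact ⟨rfl, by omega⟩

lemma pySetD_inRange {α : Type} (xs : List α) (i : Int) (v : α)
    (h : PySem.Raise.InRange xs.length i) :
    PySem.List.pySetD xs i v = xs.set (nrmIdx xs.length i) v := by
  unfold PySem.List.pySetD PySem.List.pySet?
  rw [(pyIdx?_inRange xs.length i h).1]; rfl

lemma pyGetD_inRange {α : Type} (xs : List α) (i : Int) (d : α)
    (h : PySem.Raise.InRange xs.length i) :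
    PySem.List.pyGetD xs i d = xs.getD (nrmIdx xs.length i) d := by
  unfold PySem.List.pyGetD PySem.List.pyGet?
  rw [(pyIdx?_inRange xs.length i h).1]
  simp [List.getD]

lemma pyGetD_pySetD_self {α : Type} (xs : List α) (i : Int) (v d : α)
    (h : PySem.Raise.InRange xs.length i) :
    PySem.List.pyGetD (PySem.List.pySetD xs i v) i d = v := by
  rw [pySetD_inRange xs i v h,
      pyGetD_inRange _ i d (by simpa using h)]
  simp [List.getD, (pyIdx?_inRange xs.length i h).2]

-- proof-side views of both programs
def og (o : List Int) (k : Nat) : Int := o.getD k 0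
def chAt (cs : List Char) (o : List Int) (k : Nat) : Char := PySem.List.pyGetD cs (og o k) 'A'
def flagAt (cs : List Char) (o : List Int) (k : Nat) : Int :=
  if chAt cs o (k + 1) ≠ chAt cs o k then 1 else 0
def clsAt (cs : List Char) (o : List Int) : Nat → Int
  | 0 => 0
  | k + 1 => clsAt cs o k + flagAt cs o k

def bodyA (cs : List Char) (o : List Int) (s : List Int) (k : Nat) : List Int :=
  if chAt cs o (k + 1) == chAt cs o k then
    PySem.List.pySetD s (og o (k + 1)) (PySem.List.pyGetD s (og o k) 0)
  else
    PySem.List.pySetD s (og o (k + 1)) (PySem.List.pyGetD s (og o k) 0 + 1)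

def scatterStep (s : List Int) (ic : Int × Int) : List Int := PySem.List.pySetD s ic.1 ic.2

lemma A_eq (text : String) (o : List Int) :
    compute_class text o =
      (List.range (o.length - 1)).foldl (bodyA text.toList o)
        (PySem.List.pySetD (List.replicate text.toList.length (0 : Int)) (og o 0) 0) := by
  unfold compute_class
  rw [PySem.List.len_eq, PySem.List.pyRange_one, List.foldl_map]
  have hN : ((o.length : Int) - 1).toNat = o.length - 1 := by omega
  rw [hN]
  congr 1
  · funext s k
    have h1 : (1 : Int) + (k : Int) = ((k + 1 : Nat) : Int) := by push_cast; ring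
    have h3 : ((k + 1 : Nat) : Int) - 1 = ((k : Nat) : Int) := by push_cast; ring
    simp only [h1, h3, PySem.List.pyGetD_natCast, bodyA, chAt, og]
  · simp [og, PySem.List.pyGetD_zero]

-- prefix sums
def psums (a : Int) : List Int → List Int
  | [] => []
  | f :: fs => (a + f) :: psums (a + f) fs

lemma foldl_psums (fs : List Int) (r : List Int) (a : Int) :
    ((fs.foldl (fun (p : List Int × Int) f => ((p.2 + f) :: p.1, p.2 + f)) (r, a)).1) =
      (psums a fs).reverse ++ r := by
  induction fs generalizing r a with
  | nil => simp [psums]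
  | cons f fs ih => simp [psums, ih ((a + f) :: r) (a + f)]

lemma psums_append (a : Int) (fs : List Int) (g : Int) :
    psums a (fs ++ [g]) = psums a fs ++ [a + fs.sum + g] := by
  induction fs generalizing a with
  | nil => simp [psums]
  | cons f fs ih => simp [psums, ih (a + f)]; ring_nf

lemma sum_flags (cs : List Char) (o : List Int) (m : Nat) :
    (((List.range m).map (flagAt cs o)).sum) = clsAt cs o m := by
  induction m with
  | zero => simp [clsAt]
  | succ m ih => rw [List.range_succ]; simp [clsAt, ih]

lemma map_cls (cs : List Char) (o : List Int) (m : Nat) :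
    (List.range (m + 1)).map (clsAt cs o) =
      0 :: psums 0 ((List.range m).map (flagAt cs o)) := by
  induction m with
  | zero => simp [psums, clsAt]
  | succ m ih =>
      rw [List.range_succ (n := m + 1), List.map_append, ih,
          List.range_succ (n := m), List.map_append]
      simp only [List.map_cons, List.map_nil]
      rw [psums_append]
      simp [clsAt, sum_flags]

lemma B_eq (text : String) (o : List Int) (hne : o ≠ []) :
    compute_class_alt text o =
      (o.zip ((List.range o.length).map (clsAt text.toList o))).foldl scatterStep
        (List.replicate text.toList.length (0 : Int)) := by
  have hflags : (PySem.List.pyRange 1 ((o.length : Int)) 1).map (fun k =>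
      if PySem.List.pyGetD text.toList (PySem.List.pyGetD o k 0) 'A'
           ≠ PySem.List.pyGetD text.toList (PySem.List.pyGetD o (k - 1) 0) 'A'
      then (1 : Int) else 0) = (List.range (o.length - 1)).map (flagAt text.toList o) := by
    rw [PySem.List.pyRange_one,
        show ((o.length : Int) - 1).toNat = o.length - 1 from by omega, List.map_map]
    apply List.map_congr_left
    intro k _
    simp only [Function.comp_apply]
    have h1 : (1 : Int) + (k : Int) = ((k + 1 : Nat) : Int) := by push_cast; ring
    have h3 : ((k + 1 : Nat) : Int) - 1 = ((k : Nat) : Int) := by push_cast; ring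
    simp only [h1, h3, PySem.List.pyGetD_natCast, flagAt, chAt, og]
    rfl
  have hcls : ∀ m, psums 0 (0 :: (List.range m).map (flagAt text.toList o)) =
      (List.range (m + 1)).map (clsAt text.toList o) := by
    intro m; rw [map_cls]; simp [psums]
  have hlen : o.length - 1 + 1 = o.length := by
    have := List.length_pos_of_ne_nil hne; omega
  unfold compute_class_alt
  dsimp only []
  rw [PySem.List.len_eq, hflags, foldl_psums, List.append_nil, List.reverse_reverse,
      hcls, hlen]
  rfl

lemma og_mem (o : List Int) (k : Nat) (hk : k < o.length) : og o k ∈ o := by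
  unfold og
  rw [List.getD_eq_getElem o 0 hk]
  exact List.getElem_mem hk

lemma main_inv (cs : List Char) (o : List Int) (hne : o ≠ [])
    (hi : ∀ i ∈ o, PySem.Raise.InRange cs.length i) (m : Nat) (hm : m ≤ o.length - 1) :
    ((List.range m).foldl (bodyA cs o)
        (PySem.List.pySetD (List.replicate cs.length (0 : Int)) (og o 0) 0) =
      ((o.zip ((List.range o.length).map (clsAt cs o))).take (m + 1)).foldl scatterStep
        (List.replicate cs.length (0 : Int))) ∧
    ((List.range m).foldl (bodyA cs o)
        (PySem.List.pySetD (List.replicate cs.length (0 : Int)) (og o 0) 0)).length = cs.length ∧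
    PySem.List.pyGetD ((List.range m).foldl (bodyA cs o)
        (PySem.List.pySetD (List.replicate cs.length (0 : Int)) (og o 0) 0)) (og o m) 0 =
      clsAt cs o m := by
  have hlen0 : 0 < o.length := List.length_pos_of_ne_nil hne
  have hziplen : (o.zip ((List.range o.length).map (clsAt cs o))).length = o.length := by
    simp
  induction m with
  | zero =>
      have h0 : PySem.Raise.InRange cs.length (og o 0) := hi _ (og_mem o 0 hlen0)
      have hz : (o.zip ((List.range o.length).map (clsAt cs o))).take 1 = [(og o 0, 0)] := by
        have h00 : (o.zip ((List.range o.length).map (clsAt cs o)))[0]? =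
            some (og o 0, clsAt cs o 0) := by
          rw [List.getElem?_eq_getElem (by omega)]
          simp [List.getElem_zip, og, hlen0]
        rw [show (1 : Nat) = 0 + 1 from rfl, List.take_add_one, h00]
        simp [clsAt]
      refine ⟨?_, ?_, ?_⟩
      · simp [hz, scatterStep]
      · simp [PySem.List.length_pySetD]
      · simpa [clsAt] using
          pyGetD_pySetD_self (List.replicate cs.length (0 : Int)) (og o 0) 0 0
            (by simpa using h0)
  | succ m ih =>
      obtain ⟨ihA, ihL, ihR⟩ := ih (by omega)
      have hm1 : m + 1 < o.length := by omega
      have hcur : PySem.Raise.InRange cs.length (og o (m + 1)) := hi _ (og_mem o (m + 1) hm1)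
      set sA := (List.range m).foldl (bodyA cs o)
        (PySem.List.pySetD (List.replicate cs.length (0 : Int)) (og o 0) 0) with hsA
      have hstep : (List.range (m + 1)).foldl (bodyA cs o)
          (PySem.List.pySetD (List.replicate cs.length (0 : Int)) (og o 0) 0) =
          bodyA cs o sA m := by
        rw [List.range_succ, List.foldl_append]; rfl
      have hbody : bodyA cs o sA m =
          PySem.List.pySetD sA (og o (m + 1)) (clsAt cs o (m + 1)) := by
        unfold bodyA
        by_cases hc : chAt cs o (m + 1) = chAt cs o m
        · simp [hc, ihR, clsAt, flagAt]
        · have : (chAt cs o (m + 1) == chAt cs o m) = false := by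
            simp [hc]
          simp [this, ihR, clsAt, flagAt, hc]
      have hzip1 : (o.zip ((List.range o.length).map (clsAt cs o))).take (m + 2) =
          (o.zip ((List.range o.length).map (clsAt cs o))).take (m + 1) ++
            [(og o (m + 1), clsAt cs o (m + 1))] := by
        rw [show m + 2 = (m + 1) + 1 from rfl, List.take_add_one]
        congr 1
        rw [List.getElem?_eq_getElem (by omega)]
        simp [List.getElem_zip, og, hm1]
      have hcurlen : PySem.Raise.InRange sA.length (og o (m + 1)) := by rw [ihL]; exact hcur
      refine ⟨?_, ?_, ?_⟩
      · rw [hstep, hbody, hzip1, List.foldl_append, ← ihA]; rfl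
      · rw [hstep, hbody, pySetD_inRange _ _ _ hcurlen]; simpa using ihL
      · rw [hstep, hbody]
        exact pyGetD_pySetD_self sA (og o (m + 1)) _ 0 hcurlen

-- ===== VERDICT (by name: the statement is the Claim_ definition above) =====
theorem compute_class_spec : Claim_equal_compute_class := by
  intro text o _ hpre
  obtain ⟨hne, hi⟩ := hpre
  unfold Spec_compute_class
  rw [A_eq, B_eq text o hne]
  obtain ⟨hA, -, -⟩ := main_inv text.toList o hne hi (o.length - 1) (le_refl _)
  rw [hA]
  have hlen : o.length - 1 + 1 = o.length := by
    have := List.length_pos_of_ne_nil hne; omega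
  rw [hlen, List.take_of_length_le (by simp)]
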